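-- pv_equiv track=rewrite | github.com/SohailChamadia/OCR | Code/image_preprocessing_generic.py | buffer_size
-- ===== SOURCE A (Python) =====
-- def buffer_size(hist):
--     size_buffer = []
--     concurrent_minima = 0
--     minima = min(hist)
--     i = 0
--     while i < len(hist):
--         while i < len(hist) and hist[i] > minima:
--             concurrent_minima+=1
--             i+=1
--         if concurrent_minima != 0:
--             size_buffer.append(concurrent_minima)
--             concurrent_minima = 0
--         i += 1
--     return (min(size_buffer), minima)
-- ===== SOURCE B (Python) =====
-- def buffer_size(hist):
--     minima = min(hist)
--     seps = [i for i, v in enumerate(hist) if v == minima]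
--     boundaries = [-1] + seps + [len(hist)]
--     gaps = [q - p - 1 for p, q in zip(boundaries, boundaries[1:]) if q - p - 1 > 0]
--     return (min(gaps), minima)
-- ===== Notes on version B (the rewrite author's own statement) =====
-- stated objective: alternative
-- what changed: Replaces the nested index-based while loops that count consecutive above-minimum elements with a separator/boundary formulation: collect the positions of the minimum, frame them with sentinels -1 and len(hist), and take the minimum of the positive differences between consecutive boundaries.
import Mathlib
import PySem

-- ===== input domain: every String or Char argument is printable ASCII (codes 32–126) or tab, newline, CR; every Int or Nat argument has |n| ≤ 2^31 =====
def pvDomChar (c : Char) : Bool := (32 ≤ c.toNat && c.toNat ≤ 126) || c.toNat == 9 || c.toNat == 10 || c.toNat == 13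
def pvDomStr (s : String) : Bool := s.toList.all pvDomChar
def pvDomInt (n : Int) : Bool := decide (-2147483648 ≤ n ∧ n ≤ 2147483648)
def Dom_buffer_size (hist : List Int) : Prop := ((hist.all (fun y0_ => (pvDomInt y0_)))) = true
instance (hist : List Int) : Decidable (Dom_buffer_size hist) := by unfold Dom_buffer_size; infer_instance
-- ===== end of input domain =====

-- B replaces A's nested index-based while loops by a separator/boundary formulation
-- (positions of the minimum framed by sentinels -1 and len, positive consecutive differences);
-- objective: alternative (same O(n) cost, different decomposition).


-- ===== PORT A =====
-- inner while: advance i and count while i < len(hist) and hist[i] > minima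
def innerA (hist : List Int) (minima : Int) (i : Nat) (cm : Int) : Nat × Int :=
  if h : i < hist.length then
    if minima < hist[i] then innerA hist minima (i + 1) (cm + 1) else (i, cm)
  else (i, cm)
termination_by hist.length - i

theorem innerA_fst_ge (hist : List Int) (minima : Int) (i : Nat) (cm : Int) :
    i ≤ (innerA hist minima i cm).1 := by
  fun_induction innerA <;> omega

-- outer while: run inner loop, append the nonzero count, skip one element
-- (Python computes the inner-loop result once; innerA is pure, so repeating the call is the same value)
def outerA (hist : List Int) (minima : Int) (i : Nat) (sb : List Int) : List Int :=
  if i < hist.length then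
    outerA hist minima ((innerA hist minima i 0).1 + 1)
      (if (innerA hist minima i 0).2 ≠ 0 then sb ++ [(innerA hist minima i 0).2] else sb)
  else sb
termination_by hist.length - i
decreasing_by have := innerA_fst_ge hist minima i 0; omega

def buffer_size (hist : List Int) : Int × Int :=
  match PySem.List.min? hist (fun x => x) with
  | none => (0, 0)          -- Python: min(hist) raises ValueError; excluded by Pre_
  | some minima =>
    match PySem.List.min? (outerA hist minima 0 []) (fun x => x) with
    | none => (0, minima)   -- Python: min(size_buffer) raises ValueError; excluded by Pre_
    | some m => (m, minima)

-- ===== PORT B =====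
def buffer_size_alt (hist : List Int) : Int × Int :=
  match PySem.List.min? hist (fun x => x) with
  | none => (0, 0)          -- Python: min(hist) raises ValueError; excluded by Pre_
  | some minima =>
    let seps : List Int :=
      (PySem.List.enumerate hist).filterMap (fun iv => if iv.2 = minima then some iv.1 else none)
    let boundaries : List Int := -1 :: (seps ++ [(hist.length : Int)])
    let gaps : List Int :=
      (boundaries.zip boundaries.tail).filterMap
        (fun pq => if pq.2 - pq.1 - 1 > 0 then some (pq.2 - pq.1 - 1) else none)
    match PySem.List.min? gaps (fun x => x) with
    | none => (0, minima)   -- Python: min(gaps) raises ValueError; excluded by Pre_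
    | some m => (m, minima)

-- ===== PRECONDITION & SPEC =====
-- Pre_ excludes exactly the inputs where Python A raises ValueError: the empty list
-- (min([]) raises) and constant lists (size_buffer stays empty, min([]) raises).
def Pre_buffer_size (hist : List Int) : Prop := ∃ x ∈ hist, ∃ y ∈ hist, x ≠ y
instance (hist : List Int) : Decidable (Pre_buffer_size hist) := by unfold Pre_buffer_size; infer_instance
def pvWitness_buffer_size : List Int := [2, 1, 3, 1, 2]

def Spec_buffer_size (hist : List Int) (out : Int × Int) : Prop := out = buffer_size_alt hist
instance (hist : List Int) (out : Int × Int) : Decidable (Spec_buffer_size hist out) := by unfold Spec_buffer_size; infer_instance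

-- ===== CLAIM (what is proved, stated in full; the proofs are below) =====
def Claim_equal_buffer_size : Prop := ∀ (hist : List Int), Dom_buffer_size hist → Pre_buffer_size hist → Spec_buffer_size hist (buffer_size hist)

-- ===== LEMMAS AND PROOFS =====

-- canonical run-length list: lengths of maximal runs of elements > m, with pending count c
def runsAux (m c : Int) : List Int → List Int
  | [] => if c ≠ 0 then [c] else []
  | x :: xs => if m < x then runsAux m (c + 1) xs
               else (if c ≠ 0 then [c] else []) ++ runsAux m 0 xs

-- B-side helpers for reasoning
def sepsR (m : Int) (s : Int) : List Int → List Int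
  | [] => []
  | x :: xs => if x = m then s :: sepsR m (s + 1) xs else sepsR m (s + 1) xs

def gapsFrom (b : List Int) : List Int :=
  (b.zip b.tail).filterMap (fun pq => if pq.2 - pq.1 - 1 > 0 then some (pq.2 - pq.1 - 1) else none)

theorem seps_eq (m : Int) (hist : List Int) (s : Int) :
    (PySem.List.enumerate hist s).filterMap (fun iv => if iv.2 = m then some iv.1 else none)
      = sepsR m s hist := by
  induction hist generalizing s with
  | nil => simp [PySem.List.enumerate_nil, sepsR]
  | cons x xs ih => simp only [PySem.List.enumerate_cons, List.filterMap_cons, sepsR]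
                    by_cases hx : x = m <;> simp [hx, ih]

theorem sepsR_shift (m d : Int) (l : List Int) (s : Int) :
    sepsR m (s + d) l = (sepsR m s l).map (· + d) := by
  induction l generalizing s with
  | nil => simp [sepsR]
  | cons x xs ih =>
    simp only [sepsR]
    have h1 : s + d + 1 = (s + 1) + d := by ring
    by_cases hx : x = m <;> simp [hx, h1, ih (s + 1)]

theorem gapsFrom_single (a : Int) : gapsFrom [a] = [] := rfl

theorem gapsFrom_cons2 (a b : Int) (r : List Int) :
    gapsFrom (a :: b :: r)
      = (if b - a - 1 > 0 then [b - a - 1] else []) ++ gapsFrom (b :: r) := by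
  simp only [gapsFrom, List.zip, List.tail_cons, List.zipWith_cons_cons, List.filterMap_cons]
  by_cases h : (1 : Int) < b - a
  · simp [show b - a - 1 > 0 from by omega, h]
  · simp [show ¬ b - a - 1 > 0 from by omega, h]

theorem gapsFrom_shift (b : List Int) (d : Int) :
    gapsFrom (b.map (· + d)) = gapsFrom b := by
  induction b with
  | nil => rfl
  | cons a t ih =>
    cases t with
    | nil => rfl
    | cons b r =>
      simp only [List.map_cons] at ih ⊢
      rw [gapsFrom_cons2, gapsFrom_cons2, ih]
      have : b + d - (a + d) - 1 = b - a - 1 := by ring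
      rw [this]

theorem gaps_eq_runs (m : Int) (l : List Int) (c : Int) (hc : 0 ≤ c)
    (hall : ∀ x ∈ l, m ≤ x) :
    gapsFrom ((-1 - c) :: (sepsR m 0 l ++ [(l.length : Int)])) = runsAux m c l := by
  induction l generalizing c with
  | nil =>
    simp only [sepsR, List.nil_append, List.length_nil, Int.natCast_zero, runsAux]
    rw [gapsFrom_cons2, gapsFrom_single]
    split_ifs <;> simp_all <;> omega
  | cons x xs ih =>
    have hx : m ≤ x := hall x (by simp)
    have hxs : ∀ y ∈ xs, m ≤ y := fun y hy => hall y (by simp [hy])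
    simp only [sepsR, List.length_cons]
    by_cases hxm : x = m
    · simp only [if_pos hxm]
      rw [List.cons_append, gapsFrom_cons2]
      have h0 : (0 : Int) - (-1 - c) - 1 = c := by ring
      rw [h0]
      have hmap : (0 : Int) :: (sepsR m (0 + 1) xs ++ [((xs.length + 1 : Nat) : Int)])
          = ((-1 - 0) :: (sepsR m 0 xs ++ [(xs.length : Int)])).map (· + 1) := by
        rw [sepsR_shift m 1 xs 0]
        simp
      rw [hmap, gapsFrom_shift, ih 0 le_rfl hxs]
      subst hxm
      simp only [runsAux, lt_irrefl, if_false]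
      split_ifs <;> simp_all <;> omega
    · have hlt : m < x := lt_of_le_of_ne hx (fun h => hxm h.symm)
      simp only [if_neg hxm]
      have hmap : (-1 - c) :: (sepsR m (0 + 1) xs ++ [((xs.length + 1 : Nat) : Int)])
          = ((-1 - (c + 1)) :: (sepsR m 0 xs ++ [(xs.length : Int)])).map (· + 1) := by
        rw [sepsR_shift m 1 xs 0]
        simp
        ring
      rw [hmap, gapsFrom_shift, ih (c + 1) (by omega) hxs]
      simp [runsAux, hlt]

-- A-side: characterize the inner while loop by takeWhile
theorem innerA_spec (hist : List Int) (m : Int) (i : Nat) (cm : Int) :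
    innerA hist m i cm
      = (i + ((hist.drop i).takeWhile (fun y => decide (m < y))).length,
         cm + (((hist.drop i).takeWhile (fun y => decide (m < y))).length : Int)) := by
  fun_induction innerA with
  | case1 i cm h hlt ih =>
    have hdrop : hist.drop i = hist[i] :: hist.drop (i + 1) := List.drop_eq_getElem_cons h
    have hd : decide (m < hist[i]) = true := by simpa using hlt
    rw [ih, hdrop, List.takeWhile_cons, hd, if_pos rfl]
    simp only [List.length_cons, Prod.mk.injEq]
    constructor
    · omega
    · push_cast; omega
  | case2 i cm h hlt =>
    have hdrop : hist.drop i = hist[i] :: hist.drop (i + 1) := List.drop_eq_getElem_cons h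
    have hd : decide (m < hist[i]) = false := by simpa using hlt
    rw [hdrop, List.takeWhile_cons, hd, if_neg (by simp)]
    simp
  | case3 i cm h =>
    rw [List.drop_eq_nil_of_le (by omega)]
    simp

theorem dropWhile_eq_drop_takeWhile (p : Int → Bool) (l : List Int) :
    l.dropWhile p = l.drop (l.takeWhile p).length := by
  induction l with
  | nil => rfl
  | cons x xs ih =>
    by_cases h : p x
    · simp [List.dropWhile_cons, List.takeWhile_cons, h, ih]
    · simp [List.dropWhile_cons, List.takeWhile_cons, h]

theorem runsAux_decomp (m : Int) (l : List Int) (c : Int) (hc : 0 ≤ c) :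
    runsAux m c l
      = (if c + ((l.takeWhile (fun y => decide (m < y))).length : Int) ≠ 0
          then [c + ((l.takeWhile (fun y => decide (m < y))).length : Int)] else [])
        ++ (match l.dropWhile (fun y => decide (m < y)) with
            | [] => []
            | _ :: r => runsAux m 0 r) := by
  induction l generalizing c with
  | nil => simp [runsAux]
  | cons x xs ih =>
    by_cases h : m < x
    · have hd : decide (m < x) = true := by simpa using h
      have l1 : runsAux m c (x :: xs) = runsAux m (c + 1) xs := by simp [runsAux, h]
      rw [l1, ih (c + 1) (by omega), List.takeWhile_cons, List.dropWhile_cons, hd,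
        if_pos rfl, if_pos rfl, List.length_cons]
      have e1 : c + 1 + ((xs.takeWhile (fun y => decide (m < y))).length : Int)
          = c + (((xs.takeWhile (fun y => decide (m < y))).length + 1 : Nat) : Int) := by
        push_cast; ring
      rw [e1]
    · have hd : decide (m < x) = false := by simpa using h
      simp only [List.takeWhile_cons, List.dropWhile_cons, hd, Bool.false_eq_true, if_false,
        List.length_nil, Nat.cast_zero, add_zero]
      simp [runsAux, h]

theorem outerA_spec (hist : List Int) (m : Int) (i : Nat) (sb : List Int) :
    outerA hist m i sb = sb ++ runsAux m 0 (hist.drop i) := by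
  fun_induction outerA with
  | case1 i sb h ih =>
    simp only [dite_eq_ite] at ih
    rw [ih, innerA_spec]
    dsimp only
    simp only [zero_add]
    set k := ((hist.drop i).takeWhile (fun y => decide (m < y))).length with hk
    rw [runsAux_decomp m (hist.drop i) 0 le_rfl]
    have hdw : (hist.drop i).dropWhile (fun y => decide (m < y)) = hist.drop (i + k) := by
      rw [dropWhile_eq_drop_takeWhile, ← hk, List.drop_drop]
    rw [hdw]
    have htail : hist.drop (i + k + 1) = (hist.drop (i + k)).tail := by
      rw [List.tail_drop]
    cases hcase : hist.drop (i + k) with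
    | nil =>
      have h2 : hist.drop (i + k + 1) = [] := by rw [htail, hcase]; rfl
      rw [h2]
      simp only [runsAux]
      split_ifs <;> simp_all <;> omega
    | cons y r =>
      have h2 : hist.drop (i + k + 1) = r := by rw [htail, hcase]; rfl
      rw [h2]
      simp only [zero_add]
      split_ifs with h1 h2 h2 <;> simp_all <;> omega
  | case2 i sb h =>
    rw [List.drop_eq_nil_of_le (by omega)]
    simp [runsAux]

theorem ports_agree (hist : List Int) : buffer_size hist = buffer_size_alt hist := by
  unfold buffer_size buffer_size_alt
  cases hmin : PySem.List.min? hist (fun x => x) with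
  | none => rfl
  | some m =>
    have hall : ∀ x ∈ hist, m ≤ x := fun x hx => PySem.List.min?_isMin hmin x hx
    have hA : outerA hist m 0 [] = runsAux m 0 hist := by
      rw [outerA_spec]; simp
    have hB : (List.filterMap (fun pq => if pq.2 - pq.1 - 1 > 0 then some (pq.2 - pq.1 - 1) else none)
          (((-1 : Int) :: ((PySem.List.enumerate hist).filterMap
              (fun iv => if iv.2 = m then some iv.1 else none) ++ [(hist.length : Int)])).zip
            (((-1 : Int) :: ((PySem.List.enumerate hist).filterMap
              (fun iv => if iv.2 = m then some iv.1 else none) ++ [(hist.length : Int)])).tail)))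
        = runsAux m 0 hist := by
      have hg := gaps_eq_runs m hist 0 le_rfl hall
      rw [show (-1 - 0 : Int) = -1 from by ring] at hg
      rw [← hg]
      unfold gapsFrom
      rw [seps_eq]
    dsimp only
    rw [hA, hB]

-- ===== VERDICT (by name: the statement is the Claim_ definition above) =====
theorem buffer_size_spec : Claim_equal_buffer_size := by
  intro hist _ _
  unfold Spec_buffer_size
  exact ports_agree hist
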